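-- pv_equiv track=rewrite | github.com/DubiousDoggo/programming-challenges | kattis/sequences.py | suminvmod
-- ===== SOURCE A (Python) =====
-- mod = 1000000007
--
-- def suminvmod(string: str):
--     ones = 0
--     questions = 0
--     inversions = 0
--
--     for digit in string:
--
--         if digit == '1':
--             ones += 1
--         else:
--             if digit == '?':
--                 inversions *= 2
--
--             inversions += ones * pow(2, questions, mod)
--             if questions > 0:
--                 inversions += questions * pow(2, questions - 1, mod)
--
--             if digit == '?':
--                 questions += 1
--
--             inversions %= mod
--
--     return inversions
-- ===== SOURCE B (Python) =====
-- def suminvmod(string: str):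
--     # Sum, over all completions of the '?'s, of the number of inversions (1 before 0),
--     # computed pair by pair: a pair (i, j), i < j, where position i can hold a 1 and
--     # position j can hold a 0 contributes 2^(Q - w) completions (Q = total '?'s,
--     # w = '?'s among the two positions).
--     mod = 1000000007
--     q_total = 0
--     for c in string:
--         if c == '?':
--             q_total += 1
--     total = 0
--     seen = ""
--     for cj in string:
--         if cj != '1':
--             e = 1 if cj == '?' else 0
--             for ci in seen:
--                 if ci == '1':
--                     total += pow(2, q_total - e, mod)
--                 elif ci == '?':
--                     total += pow(2, q_total - e - 1, mod)
--         seen += cj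
--     return total % mod
-- ===== Notes on version B (the rewrite author's own statement) =====
-- stated objective: alternative
-- what changed: Replaces A's single-pass doubling DP (running expected-inversion accumulator with modular updates per character) by a direct pairwise summation: count Q wildcards once, then for every ordered pair i<j where i can be 1 and j can be 0 add 2^(Q-w) mod p, w = wildcards among the pair.
import Mathlib
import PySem

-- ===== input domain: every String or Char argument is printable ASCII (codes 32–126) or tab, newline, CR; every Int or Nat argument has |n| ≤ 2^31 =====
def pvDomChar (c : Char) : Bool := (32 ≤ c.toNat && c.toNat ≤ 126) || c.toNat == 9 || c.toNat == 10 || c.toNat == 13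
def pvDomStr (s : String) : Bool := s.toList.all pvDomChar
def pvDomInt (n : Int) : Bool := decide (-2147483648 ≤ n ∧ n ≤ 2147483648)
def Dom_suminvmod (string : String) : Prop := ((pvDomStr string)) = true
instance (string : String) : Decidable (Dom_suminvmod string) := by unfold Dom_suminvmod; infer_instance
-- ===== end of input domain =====

-- B replaces A's single-pass doubling DP by a direct pairwise summation (same value, not faster).

-- pow(2, e, 1000000007): exact for 0 ≤ e, the only way both programs call it
def pow2mod (e : Int) : Int := (2 ^ e.toNat) % 1000000007

-- ===== PORT A =====
def stepA (st : Int × Int × Int) (digit : Char) : Int × Int × Int :=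
  let ones := st.1; let questions := st.2.1; let inversions := st.2.2
  if digit = '1' then (ones + 1, questions, inversions)
  else
    let inversions := if digit = '?' then inversions * 2 else inversions
    let inversions := inversions + ones * pow2mod questions
    let inversions := if questions > 0 then inversions + questions * pow2mod (questions - 1) else inversions
    let questions := if digit = '?' then questions + 1 else questions
    (ones, questions, PySem.Int.mod inversions 1000000007)

def suminvmod (string : String) : Int :=
  (string.toList.foldl stepA (0, 0, 0)).2.2

-- ===== PORT B =====
def stepB (qtotal : Int) (st : List Char × Int) (cj : Char) : List Char × Int :=
  let seen := st.1; let total := st.2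
  let total :=
    if cj ≠ '1' then
      let e : Int := if cj = '?' then 1 else 0
      seen.foldl (fun t ci =>
        if ci = '1' then t + pow2mod (qtotal - e)
        else if ci = '?' then t + pow2mod (qtotal - e - 1)
        else t) total
    else total
  (seen ++ [cj], total)

def suminvmod_alt (string : String) : Int :=
  let qtotal : Int := string.toList.foldl (fun q c => if c == '?' then q + 1 else q) 0
  let res := string.toList.foldl (stepB qtotal) ([], 0)
  PySem.Int.mod res.2 1000000007

-- ===== PRECONDITION & SPEC =====
def Spec_suminvmod (string : String) (out : Int) : Prop := out = suminvmod_alt string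
instance (string : String) (out : Int) : Decidable (Spec_suminvmod string out) := by unfold Spec_suminvmod; infer_instance

-- ===== CLAIM (what is proved, stated in full; the proofs are below) =====
def Claim_equal_suminvmod : Prop := ∀ (string : String), Dom_suminvmod string → Spec_suminvmod string (suminvmod string)

-- ===== LEMMAS AND PROOFS =====

-- exact (unreduced) per-position contribution sum, parametrised by the prefix counts o (ones) and q ('?'s)
def Npart : List Char → Nat → Nat → Int
  | [], _, _ => 0
  | c :: t, o, q =>
    (if c = '1' then 0
     else (o : Int) * 2 ^ (q + t.count '?') + (q : Int) * 2 ^ (q + t.count '?' - 1))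
    + Npart t (if c = '1' then o + 1 else o) (if c = '?' then q + 1 else q)

-- B's contribution sum with the modded powers it actually adds, Q the global '?' count
def NB (Q : Nat) : List Char → Nat → Nat → Int
  | [], _, _ => 0
  | c :: t, o, q =>
    (if c = '1' then 0
     else
       let e : Int := if c = '?' then 1 else 0
       (o : Int) * pow2mod ((Q : Int) - e) + (q : Int) * pow2mod ((Q : Int) - e - 1))
    + NB Q t (if c = '1' then o + 1 else o) (if c = '?' then q + 1 else q)

lemma mbase (a : Int) : Int.ModEq 1000000007 (a % 1000000007) a :=
  Int.emod_emod_of_dvd a dvd_rfl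

lemma LA (t : List Char) : ∀ (o q : Nat) (inv : Int),
    (t.foldl stepA ((o : Int), (q : Int), inv)).2.2 % 1000000007
      = (2 ^ t.count '?' * inv + Npart t o q) % 1000000007 := by
  induction t with
  | nil => intro o q inv; simp [Npart]
  | cons c t ih =>
    intro o q inv
    simp only [List.foldl_cons]
    by_cases h1 : c = '1'
    · have hs : stepA ((o : Int), (q : Int), inv) c = ((((o + 1 : Nat)) : Int), (q : Int), inv) := by
        simp [stepA, h1]
      rw [hs, ih]
      simp [Npart, h1]
    · have hs : stepA ((o : Int), (q : Int), inv) c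
          = ((o : Int), ((if c = '?' then q + 1 else q : Nat) : Int),
             ((if (q : Int) > 0
               then (if c = '?' then inv * 2 else inv) + (o : Int) * pow2mod (q : Int)
                      + (q : Int) * pow2mod ((q : Int) - 1)
               else (if c = '?' then inv * 2 else inv) + (o : Int) * pow2mod (q : Int))
              % 1000000007)) := by
        by_cases h2 : c = '?' <;> by_cases hq : (q : Int) > 0 <;>
          simp [stepA, h1, h2, hq,
            PySem.Int.mod_eq_emod_of_pos (by decide : (0:Int) < 1000000007)] <;>
          push_cast <;> ring_nf
      rw [hs, ih]
      have hhead : Npart (c :: t) o q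
          = ((o : Int) * 2 ^ (q + t.count '?') + (q : Int) * 2 ^ (q + t.count '?' - 1))
            + Npart t o (if c = '?' then q + 1 else q) := by
        simp [Npart, h1]
      rcases Nat.eq_zero_or_pos q with hq0 | hqpos
    -- q = 0: the 'questions > 0' branch is dead and the q-term of the head vanishes
      · subst hq0
        have hiq : ¬ ((0 : Nat) : Int) > 0 := by decide
        rw [if_neg hiq]
        have habs :
            (2 ^ t.count '?' * (((if c = '?' then inv * 2 else inv) + (o : Int) * pow2mod ((0:Nat) : Int)) % 1000000007)
              + Npart t o (if c = '?' then 0 + 1 else 0)) % 1000000007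
            = (2 ^ t.count '?' * ((if c = '?' then inv * 2 else inv) + (o : Int) * 2 ^ (0:Nat))
              + Npart t o (if c = '?' then 0 + 1 else 0)) % 1000000007 := by
          refine Int.ModEq.add (Int.ModEq.mul_left _ ?_) (Int.ModEq.refl _)
          refine (mbase _).trans (Int.ModEq.add_left _ (Int.ModEq.mul_left _ ?_))
          simp [pow2mod]
        rw [habs, hhead]
        by_cases h2 : c = '?' <;>
          simp [h2, List.count_cons, pow_add, pow_succ] <;> ring_nf
      · obtain ⟨qq, rfl⟩ : ∃ qq, q = qq + 1 := ⟨q - 1, by omega⟩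
        have hiq : ((qq + 1 : Nat) : Int) > 0 := by positivity
        rw [if_pos hiq]
        have hpq : pow2mod ((qq + 1 : Nat) : Int) = 2 ^ (qq + 1) % 1000000007 := by
          simp [pow2mod]
        have hpq1 : pow2mod (((qq + 1 : Nat) : Int) - 1) = 2 ^ qq % 1000000007 := by
          have : (((qq + 1 : Nat) : Int) - 1).toNat = qq := by omega
          simp [pow2mod, this]
        rw [hpq, hpq1]
        have habs :
            (2 ^ t.count '?' * (((if c = '?' then inv * 2 else inv) + (o : Int) * (2 ^ (qq+1) % 1000000007)
                + ((qq + 1 : Nat) : Int) * (2 ^ qq % 1000000007)) % 1000000007)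
              + Npart t o (if c = '?' then (qq+1) + 1 else (qq+1))) % 1000000007
            = (2 ^ t.count '?' * ((if c = '?' then inv * 2 else inv) + (o : Int) * 2 ^ (qq+1)
                + ((qq + 1 : Nat) : Int) * 2 ^ qq)
              + Npart t o (if c = '?' then (qq+1) + 1 else (qq+1))) % 1000000007 := by
          refine Int.ModEq.add (Int.ModEq.mul_left _ ?_) (Int.ModEq.refl _)
          exact (mbase _).trans
            (Int.ModEq.add (Int.ModEq.add_left _ ((mbase _).mul_left _)) ((mbase _).mul_left _))
        rw [habs, hhead]
        by_cases h2 : c = '?' <;>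
          simp [h2, List.count_cons, pow_add, pow_succ] <;> push_cast <;> ring_nf

lemma LR (t : List Char) : ∀ (st : Int × Int × Int), 0 ≤ st.2.2 → st.2.2 < 1000000007 →
    0 ≤ (t.foldl stepA st).2.2 ∧ (t.foldl stepA st).2.2 < 1000000007 := by
  induction t with
  | nil => intro st h0 h1; exact ⟨h0, h1⟩
  | cons c t ih =>
    intro st h0 h1
    simp only [List.foldl_cons]
    by_cases hc : c = '1'
    · exact ih _ (by simpa [stepA, hc] using h0) (by simpa [stepA, hc] using h1)
    · refine ih _ ?_ ?_ <;>
        simp only [stepA, hc, if_neg hc, ite_false,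
          PySem.Int.mod_eq_emod_of_pos (by decide : (0:Int) < 1000000007)]
      · exact Int.emod_nonneg _ (by decide)
      · exact Int.emod_lt_of_pos _ (by decide)

lemma LB1 (seen : List Char) : ∀ (tot X Y : Int),
    (seen.foldl (fun t ci => if ci = '1' then t + X else if ci = '?' then t + Y else t) tot)
      = tot + (seen.count '1') * X + (seen.count '?') * Y := by
  induction seen with
  | nil => intro tot X Y; simp
  | cons c cs ih =>
    intro tot X Y
    simp only [List.foldl_cons]
    by_cases h1 : c = '1'
    · simp [ih, List.count_cons, h1]; push_cast; ring
    · by_cases h2 : c = '?'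
      · simp [ih, List.count_cons, h1, h2]; push_cast; ring
      · simp [ih, List.count_cons, h1, h2]

lemma LB2 (Q : Nat) (t : List Char) : ∀ (seen : List Char) (tot : Int),
    (t.foldl (stepB (Q : Int)) (seen, tot)).2
      = tot + NB Q t (seen.count '1') (seen.count '?') := by
  induction t with
  | nil => intro seen tot; simp [NB]
  | cons c t ih =>
    intro seen tot
    simp only [List.foldl_cons]
    by_cases h1 : c = '1'
    · simp [stepB, h1, ih, NB, List.count_append]
    · by_cases h2 : c = '?'
      · simp [stepB, h1, h2, ih, LB1, NB, List.count_append]; ring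
      · simp [stepB, h1, h2, ih, LB1, NB, List.count_append]; ring

lemma LB3 (Q : Nat) (t : List Char) : ∀ (o q : Nat), Q = q + t.count '?' →
    NB Q t o q % 1000000007 = Npart t o q % 1000000007 := by
  induction t with
  | nil => intro o q _; rfl
  | cons c t ih =>
    intro o q hQ
    by_cases h1 : c = '1'
    · have hcnt : (c :: t).count '?' = t.count '?' := by simp [h1]
      have := ih (o + 1) q (by omega)
      simpa [NB, Npart, h1] using this
    · by_cases h2 : c = '?'
      · have hcnt : (c :: t).count '?' = t.count '?' + 1 := by simp [h2]
        have hrec := ih o (q + 1) (by omega)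
        have e1 : ((Q : Int) - 1).toNat = q + t.count '?' := by omega
        have e2 : ((Q : Int) - 1 - 1).toNat = q + t.count '?' - 1 := by omega
        simp only [NB, Npart, if_neg (by decide : ¬ ('?' = '1')), h2, if_true, pow2mod, e1, e2]
        exact ((((mbase _).mul_left _).add ((mbase _).mul_left _)).add hrec)
      · have hcnt : (c :: t).count '?' = t.count '?' := by simp [h2]
        have hrec := ih o q (by omega)
        have e1 : ((Q : Int) - 0).toNat = q + t.count '?' := by omega
        have e2 : ((Q : Int) - 0 - 1).toNat = q + t.count '?' - 1 := by omega
        simp only [NB, Npart, if_neg h1, if_neg h2, pow2mod, e1, e2]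
        exact ((((mbase _).mul_left _).add ((mbase _).mul_left _)).add hrec)

-- ===== VERDICT (by name: the statement is the Claim_ definition above) =====
theorem suminvmod_spec : Claim_equal_suminvmod := by
  intro s _
  show suminvmod s = suminvmod_alt s
  have hq : s.toList.foldl (fun q c => if c == '?' then q + 1 else q) (0:Int)
      = ((s.toList.count '?' : Nat) : Int) := by
    simpa using PySem.List.foldl_beq_add_one (l := s.toList) (v := '?') (a := (0:Int))
  have hBval : suminvmod_alt s = NB (s.toList.count '?') s.toList 0 0 % 1000000007 := by
    unfold suminvmod_alt
    simp only [hq, PySem.Int.mod_eq_emod_of_pos (by decide : (0:Int) < 1000000007)]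
    rw [LB2]
    simp
  have hAval : suminvmod s = Npart s.toList 0 0 % 1000000007 := by
    unfold suminvmod
    have h0 := LR s.toList ((0:Int), (0:Int), (0:Int)) (by simp) (by decide)
    have hA := LA s.toList 0 0 0
    simp only [Nat.cast_zero] at hA
    calc (s.toList.foldl stepA ((0:Int), (0:Int), (0:Int))).2.2
        = (s.toList.foldl stepA ((0:Int), (0:Int), (0:Int))).2.2 % 1000000007 :=
          (Int.emod_eq_of_lt h0.1 h0.2).symm
      _ = (2 ^ s.toList.count '?' * 0 + Npart s.toList 0 0) % 1000000007 := hA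
      _ = Npart s.toList 0 0 % 1000000007 := by ring_nf
  rw [hAval, hBval]
  exact (LB3 (s.toList.count '?') s.toList 0 0 (by simp)).symm
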